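-- pv_equiv track=rewrite | github.com/jiatongw/notes | code/track/fb.py | calculate
-- ===== SOURCE A (Python) =====
-- class compressVector:
--     def __init__(self, vec):
--         self.compressed = self.compress(vec)
--
--     def compress(self, vec):
--
--         res = []
--         i = 0
--         while i < len(vec):
--             val = vec[i]
--             count = 1
--
--             while i < len(vec) - 1 and vec[i + 1] == val:
--                 count += 1
--                 i += 1
--
--             res.append([count, val])
--             i += 1
--         return res
--
-- def calculate(vector1, vector2):
--     vector1 = compressVector(vector1).compressed
--     vector2 = compressVector(vector2).compressed
--     ### vector1 = [[2, 1], [4, 4], [5, 7], [10, 2]]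
--     ### vector2 = [[2, 2], [7, 5], [12, 3]]
--
--     dotProduct = 0
--     i = 0
--     j = 0
--     while i < len(vector1) and j < len(vector2):
--         a = vector1[i]
--         b = vector2[j]
--
--         multiplier = min(a[0], b[0])
--         a[0] -= multiplier
--         b[0] -= multiplier
--
--         dotProduct += multiplier * a[1] * b[1]
--
--         if a[0] == 0:
--             i += 1
--         if b[0] == 0:
--             j += 1
--     return dotProduct
-- ===== SOURCE B (Python) =====
-- def calculate(vector1, vector2):
--     return sum(x * y for x, y in zip(vector1, vector2))
-- ===== Notes on version B (the rewrite author's own statement) =====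
-- stated objective: simpler
-- what changed: Drops the run-length compression and two-pointer merge entirely; B sums x*y over zip(vector1, vector2) in one direct pass.
import Mathlib
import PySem

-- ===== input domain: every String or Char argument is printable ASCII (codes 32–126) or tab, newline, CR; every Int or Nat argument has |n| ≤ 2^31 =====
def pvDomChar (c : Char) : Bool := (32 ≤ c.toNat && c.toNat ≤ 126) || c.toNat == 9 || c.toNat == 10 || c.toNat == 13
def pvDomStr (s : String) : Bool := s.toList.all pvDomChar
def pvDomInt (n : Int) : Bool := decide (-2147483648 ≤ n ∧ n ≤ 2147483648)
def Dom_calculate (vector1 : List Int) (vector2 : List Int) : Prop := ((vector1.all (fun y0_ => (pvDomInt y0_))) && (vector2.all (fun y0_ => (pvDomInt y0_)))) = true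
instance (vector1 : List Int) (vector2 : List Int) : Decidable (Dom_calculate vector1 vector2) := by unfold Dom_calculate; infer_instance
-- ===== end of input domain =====

-- B drops A's run-length compression and two-pointer merge: it sums x*y over the zipped
-- vectors in one direct pass (objective: simpler). Neither version mutates its arguments
-- (A mutates only its internal compressed copies).

-- ===== PORT A =====
-- inner while of compress: extend the current run (val, count) or close it and start a new one
def compressAux (val : Int) (count : Int) : List Int → List (Int × Int)
  | [] => [(count, val)]
  | x :: xs =>
    if x = val then compressAux val (count + 1) xs
    else (count, val) :: compressAux x 1 xs

-- compressVector(vec).compressed : list of (count, value) runs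
def compress : List Int → List (Int × Int)
  | [] => []
  | x :: xs => compressAux x 1 xs

-- the two-pointer merge loop of calculate; advancing a pointer = dropping a list head,
-- the in-place 'a[0] -= multiplier' = keeping the head with its count reduced
def mergeDot : List (Int × Int) → List (Int × Int) → Int
  | (a0, a1) :: r1, (b0, b1) :: r2 =>
    let m := min a0 b0
    m * a1 * b1 +
      mergeDot (if a0 - m = 0 then r1 else (a0 - m, a1) :: r1)
               (if b0 - m = 0 then r2 else (b0 - m, b1) :: r2)
  | _, _ => 0
termination_by c1 c2 => c1.length + c2.length
decreasing_by
  split_ifs <;> simp_all <;> omega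

def calculate (vector1 : List Int) (vector2 : List Int) : Int :=
  mergeDot (compress vector1) (compress vector2)

-- ===== PORT B =====
def calculate_alt (vector1 : List Int) (vector2 : List Int) : Int :=
  (vector1.zip vector2).foldl (fun acc p => acc + p.1 * p.2) 0

-- ===== PRECONDITION & SPEC =====
def Spec_calculate (vector1 : List Int) (vector2 : List Int) (out : Int) : Prop := out = calculate_alt vector1 vector2
instance (vector1 : List Int) (vector2 : List Int) (out : Int) : Decidable (Spec_calculate vector1 vector2 out) := by unfold Spec_calculate; infer_instance

-- ===== CLAIM (what is proved, stated in full; the proofs are below) =====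
def Claim_equal_calculate : Prop := ∀ (vector1 : List Int) (vector2 : List Int), Dom_calculate vector1 vector2 → Spec_calculate vector1 vector2 (calculate vector1 vector2)

-- ===== LEMMAS AND PROOFS =====

-- decompression of a run-length list
def expand : List (Int × Int) → List Int
  | [] => []
  | (c, v) :: r => List.replicate c.toNat v ++ expand r

-- structural dot product (truncates at the shorter list, like zip)
def dotL : List Int → List Int → Int
  | x :: xs, y :: ys => x * y + dotL xs ys
  | _, _ => 0

theorem expand_compressAux (xs : List Int) : ∀ (val c : Int), 0 ≤ c →
    expand (compressAux val c xs) = List.replicate c.toNat val ++ xs := by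
  induction xs with
  | nil => intro val c _; simp [compressAux, expand]
  | cons x xs ih =>
    intro val c hc
    by_cases h : x = val
    · subst h
      simp only [compressAux, if_true]
      rw [ih x (c + 1) (by omega)]
      have : (c + 1).toNat = c.toNat + 1 := by omega
      rw [this, List.replicate_succ', List.append_assoc]
      simp
    · simp only [compressAux, if_neg h, expand]
      rw [ih x 1 (by omega)]
      simp

theorem expand_compress (v : List Int) : expand (compress v) = v := by
  cases v with
  | nil => rfl
  | cons x xs => simpa using expand_compressAux xs x 1 (by omega)

theorem compressAux_wf (xs : List Int) : ∀ (val c : Int), 1 ≤ c →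
    ∀ p ∈ compressAux val c xs, 1 ≤ p.1 := by
  induction xs with
  | nil => intro val c hc p hp; simp [compressAux] at hp; simp [hp, hc]
  | cons x xs ih =>
    intro val c hc p hp
    by_cases h : x = val
    · subst h; simp only [compressAux, if_true] at hp
      exact ih x (c + 1) (by omega) p hp
    · simp only [compressAux, if_neg h, List.mem_cons] at hp
      rcases hp with rfl | hp
      · exact hc
      · exact ih x 1 (by omega) p hp

theorem compress_wf (v : List Int) : ∀ p ∈ compress v, 1 ≤ p.1 := by
  cases v with
  | nil => intro p hp; simp [compress] at hp
  | cons x xs => exact compressAux_wf xs x 1 (by omega)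

theorem foldl_zip_dotL (xs : List Int) : ∀ (ys : List Int) (a : Int),
    (xs.zip ys).foldl (fun acc p => acc + p.1 * p.2) a = a + dotL xs ys := by
  induction xs with
  | nil => intro ys a; simp [dotL]
  | cons x xs ih =>
    intro ys a
    cases ys with
    | nil => simp [dotL]
    | cons y ys =>
      simp only [List.zip_cons_cons, List.foldl_cons, dotL]
      rw [ih ys (a + x * y)]; ring

theorem dotL_nil_right (xs : List Int) : dotL xs [] = 0 := by
  cases xs <;> simp [dotL]

theorem dotL_replicate (n : ℕ) : ∀ (x y : Int) (xs ys : List Int),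
    dotL (List.replicate n x ++ xs) (List.replicate n y ++ ys) = n * x * y + dotL xs ys := by
  induction n with
  | zero => intro x y xs ys; simp
  | succ n ih =>
    intro x y xs ys
    simp only [List.replicate_succ, List.cons_append, dotL]
    rw [ih]; push_cast; ring

theorem replicate_split (c m : Int) (hm : 0 ≤ m) (hcm : m ≤ c) (x : Int) :
    List.replicate c.toNat x = List.replicate m.toNat x ++ List.replicate (c - m).toNat x := by
  rw [← List.replicate_add]
  congr 1
  omega

theorem mergeDot_eq_dotL : ∀ (c1 c2 : List (Int × Int)),
    (∀ p ∈ c1, 1 ≤ p.1) → (∀ p ∈ c2, 1 ≤ p.1) →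
    mergeDot c1 c2 = dotL (expand c1) (expand c2) := by
  intro c1 c2
  induction c1, c2 using mergeDot.induct with
  | case2 c1 c2 h =>
    intro _ _
    rcases c1 with _ | ⟨⟨a0, a1⟩, r1⟩
    · cases c2 <;> simp [mergeDot, expand, dotL]
    · rcases c2 with _ | ⟨⟨b0, b1⟩, r2⟩
      · simp [mergeDot, expand, dotL_nil_right]
      · exact (h a0 a1 r1 b0 b1 r2 rfl rfl).elim
  | case1 a0 a1 r1 b0 b1 r2 m ih =>
    intro h1 h2
    have hm : m = min a0 b0 := rfl
    have ha0 : 1 ≤ a0 := h1 (a0, a1) (by simp)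
    have hb0 : 1 ≤ b0 := h2 (b0, b1) (by simp)
    have hm0 : 0 ≤ m := by rw [hm]; omega
    have hma : m ≤ a0 := by rw [hm]; omega
    have hmb : m ≤ b0 := by rw [hm]; omega
    simp only [dite_eq_ite] at ih
    have key : expand (if a0 - m = 0 then r1 else (a0 - m, a1) :: r1)
        = List.replicate (a0 - m).toNat a1 ++ expand r1 := by
      split_ifs with h
      · rw [h]; simp
      · simp [expand]
    have key2 : expand (if b0 - m = 0 then r2 else (b0 - m, b1) :: r2)
        = List.replicate (b0 - m).toNat b1 ++ expand r2 := by
      split_ifs with h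
      · rw [h]; simp
      · simp [expand]
    have wf1 : ∀ p ∈ (if a0 - m = 0 then r1 else (a0 - m, a1) :: r1), 1 ≤ p.1 := by
      split_ifs with h
      · exact fun p hp => h1 p (by simp [hp])
      · intro p hp
        rcases List.mem_cons.mp hp with rfl | hp
        · simp; omega
        · exact h1 p (by simp [hp])
    have wf2 : ∀ p ∈ (if b0 - m = 0 then r2 else (b0 - m, b1) :: r2), 1 ≤ p.1 := by
      split_ifs with h
      · exact fun p hp => h2 p (by simp [hp])
      · intro p hp
        rcases List.mem_cons.mp hp with rfl | hp
        · simp; omega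
        · exact h2 p (by simp [hp])
    have step : mergeDot ((a0, a1) :: r1) ((b0, b1) :: r2)
        = m * a1 * b1 + mergeDot (if a0 - m = 0 then r1 else (a0 - m, a1) :: r1)
                                 (if b0 - m = 0 then r2 else (b0 - m, b1) :: r2) := by
      rw [mergeDot]
    rw [step, ih wf1 wf2, key, key2]
    show _ = dotL (expand ((a0, a1) :: r1)) (expand ((b0, b1) :: r2))
    simp only [expand]
    rw [replicate_split a0 m hm0 hma a1, replicate_split b0 m hm0 hmb b1,
        List.append_assoc, List.append_assoc, dotL_replicate]
    have : (m.toNat : Int) = m := by omega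
    rw [this]

theorem dotL_eq_alt (v1 v2 : List Int) : calculate_alt v1 v2 = dotL v1 v2 := by
  unfold calculate_alt
  rw [foldl_zip_dotL]; ring

-- ===== VERDICT (by name: the statement is the Claim_ definition above) =====
theorem calculate_spec : Claim_equal_calculate := by
  intro v1 v2 _
  unfold Spec_calculate calculate
  rw [mergeDot_eq_dotL _ _ (compress_wf v1) (compress_wf v2),
      expand_compress, expand_compress, dotL_eq_alt]
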